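-- pv_equiv track=rewrite | github.com/wlpinjlte/Algorithms-and-Datastructures | asd_dynamiki/zad5/zad5_jeszcze_raz.py | f
-- ===== SOURCE A (Python) =====
-- def f(i,j,F,A):
--     if F[i][j]!=-1:
--         return F[i][j]
--     if i==j:
--         F[i][i]=A[i]
--         return A[i]
--     if j==i+1:
--         F[i][i+1]=max(A[i],A[i+1])
--         return max(A[i],A[i+1])
--     F[i][j]=max(A[i]+min(f(i+1,j-1,F,A),f(i+2,j,F,A)),A[j]+min(f(i+1,j-1,F,A),f(i,j-2,F,A)))
--     return F[i][j]
-- ===== SOURCE B (Python) =====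
-- def f(i, j, F, A):
--     # Bottom-up tabulation of the same game recurrence; computes the return
--     # value only (does not mutate F, unlike the original).
--     if F[i][j] != -1:
--         return F[i][j]
--     G = {}
--     for d in range(j - i + 1):
--         if d % 2 != (j - i) % 2:
--             continue
--         for p in range(i, j - d + 1):
--             q = p + d
--             if F[p][q] != -1:
--                 G[(p, q)] = F[p][q]
--             elif d == 0:
--                 G[(p, q)] = A[p]
--             elif d == 1:
--                 G[(p, q)] = max(A[p], A[q])
--             else:
--                 G[(p, q)] = max(A[p] + min(G[(p + 1, q - 1)], G[(p + 2, q)]),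
--                                 A[q] + min(G[(p + 1, q - 1)], G[(p, q - 2)]))
--     return G[(i, j)]
-- ===== Notes on version B (the rewrite author's own statement) =====
-- stated objective: alternative
-- what changed: Replaced the memoized top-down recursion (which mutates the memo table F) by an iterative bottom-up tabulation over interval lengths into a fresh dictionary, honouring pre-populated (non -1) entries of F and leaving F unmutated; equivalence is about the return value only.
-- outside the precondition, e.g. on f(-1, -1, [[-1]], [5]): A returns 5, B returns 5
import Mathlib
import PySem

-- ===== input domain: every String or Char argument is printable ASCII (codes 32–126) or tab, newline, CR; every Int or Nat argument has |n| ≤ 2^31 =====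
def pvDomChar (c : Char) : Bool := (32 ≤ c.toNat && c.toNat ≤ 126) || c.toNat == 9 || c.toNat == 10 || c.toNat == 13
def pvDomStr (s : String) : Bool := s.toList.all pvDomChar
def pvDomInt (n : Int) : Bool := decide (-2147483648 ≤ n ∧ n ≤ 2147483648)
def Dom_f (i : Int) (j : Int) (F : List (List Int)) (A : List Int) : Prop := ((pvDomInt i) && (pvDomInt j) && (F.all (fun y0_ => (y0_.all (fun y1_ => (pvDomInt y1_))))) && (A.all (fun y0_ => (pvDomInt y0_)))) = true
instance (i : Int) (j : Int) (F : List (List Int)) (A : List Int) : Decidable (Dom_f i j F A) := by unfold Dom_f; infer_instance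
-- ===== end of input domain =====

-- B replaces A's memoized top-down recursion by a bottom-up tabulation over interval
-- lengths into a fresh dictionary (honouring pre-populated non-(-1) entries of F).
-- A mutates its argument F in place; B does not: the equivalence proved here is about
-- the RETURN value only.

-- ===== PORT A =====
-- F[p][q] read; exact for indices admitted by Pre_f (Python raises IndexError outside)
def pvGetF (F : List (List Int)) (p q : Int) : Int :=
  PySem.List.pyGetD (PySem.List.pyGetD F p []) q 0

-- F[p][q] = v; exact for indices admitted by Pre_f
def pvSetF (F : List (List Int)) (p q : Int) (v : Int) : List (List Int) :=
  PySem.List.pySetD F p (PySem.List.pySetD (PySem.List.pyGetD F p []) q v)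

-- the recursion, threading the mutated table F as state; fuel (j-i).toNat+1 suffices
-- because every recursive call shrinks j-i by 2 (Pre_f gives i ≤ j)
def fAux : Nat → Int → Int → List (List Int) → List Int → Int × List (List Int)
  | 0, _, _, F, _ => (0, F)
  | fuel+1, i, j, F, A =>
    if pvGetF F i j ≠ -1 then (pvGetF F i j, F)
    else if i = j then (PySem.List.pyGetD A i 0, pvSetF F i i (PySem.List.pyGetD A i 0))
    else if j = i + 1 then
      (max (PySem.List.pyGetD A i 0) (PySem.List.pyGetD A (i+1) 0),
       pvSetF F i (i+1) (max (PySem.List.pyGetD A i 0) (PySem.List.pyGetD A (i+1) 0)))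
    else
      -- Python's evaluation order in the max/min expression: f(i+1,j-1), f(i+2,j), f(i+1,j-1), f(i,j-2)
      let r1 := fAux fuel (i+1) (j-1) F A
      let r2 := fAux fuel (i+2) j r1.2 A
      let r3 := fAux fuel (i+1) (j-1) r2.2 A
      let r4 := fAux fuel i (j-2) r3.2 A
      let v := max (PySem.List.pyGetD A i 0 + min r1.1 r2.1)
                   (PySem.List.pyGetD A j 0 + min r3.1 r4.1)
      (v, pvSetF r4.2 i j v)

def f (i : Int) (j : Int) (F : List (List Int)) (A : List Int) : Int :=
  (fAux ((j - i).toNat + 1) i j F A).1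

-- ===== PORT B =====
-- body of B's inner loop: fill cell (p, p+d) of the table G
def bCell (F : List (List Int)) (A : List Int) (d : Int)
    (G : PySem.Dict (Int × Int) Int) (p : Int) : PySem.Dict (Int × Int) Int :=
  let q := p + d
  let v :=
    if pvGetF F p q ≠ -1 then pvGetF F p q
    else if d = 0 then PySem.List.pyGetD A p 0
    else if d = 1 then max (PySem.List.pyGetD A p 0) (PySem.List.pyGetD A q 0)
    else max (PySem.List.pyGetD A p 0 + min (G.getD (p+1, q-1) 0) (G.getD (p+2, q) 0))
             (PySem.List.pyGetD A q 0 + min (G.getD (p+1, q-1) 0) (G.getD (p, q-2) 0))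
  G.insert (p, q) v

-- body of B's outer loop: one interval length d (skipped unless d has the parity of j-i)
def bRow (i j : Int) (F : List (List Int)) (A : List Int)
    (G : PySem.Dict (Int × Int) Int) (d : Int) : PySem.Dict (Int × Int) Int :=
  if PySem.Int.mod d 2 ≠ PySem.Int.mod (j - i) 2 then G
  else (PySem.List.pyRange i (j - d + 1) 1).foldl (bCell F A d) G

def f_alt (i : Int) (j : Int) (F : List (List Int)) (A : List Int) : Int :=
  if pvGetF F i j ≠ -1 then pvGetF F i j
  else ((PySem.List.pyRange 0 (j - i + 1) 1).foldl (bRow i j F A) PySem.Dict.empty).getD (i, j) 0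

-- ===== PRECONDITION & SPEC =====
-- Pre_f admits (a) memo hits — F[i][j] is a valid (possibly negative) index holding a
-- non-(-1) value, so A returns it at once — and (b) full games with 0 ≤ i ≤ j < len(A) and
-- rows i..j of F longer than j. It excludes inputs where Python A raises (IndexError on a
-- too-short row/array, unbounded recursion for i > j) and games that only complete via
-- Python's negative-index wraparound, which the ports do not model.
def Pre_f (i : Int) (j : Int) (F : List (List Int)) (A : List Int) : Prop :=
  (PySem.Raise.InRange F.length i ∧ PySem.Raise.InRange (PySem.List.pyGetD F i []).length j ∧
    pvGetF F i j ≠ -1) ∨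
  (0 ≤ i ∧ i ≤ j ∧ j < (A.length : Int) ∧ j < (F.length : Int) ∧
    ∀ row ∈ (F.drop i.toNat).take (j.toNat - i.toNat + 1), j < (row.length : Int))
instance (i : Int) (j : Int) (F : List (List Int)) (A : List Int) : Decidable (Pre_f i j F A) := by
  unfold Pre_f; infer_instance

def pvWitness_f : Int × Int × List (List Int) × List Int :=
  (0, 2, [[-1, -1, -1], [-1, -1, -1], [-1, -1, -1]], [3, 1, 5])

def Spec_f (i : Int) (j : Int) (F : List (List Int)) (A : List Int) (out : Int) : Prop := out = f_alt i j F A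
instance (i : Int) (j : Int) (F : List (List Int)) (A : List Int) (out : Int) : Decidable (Spec_f i j F A out) := by unfold Spec_f; infer_instance

-- ===== CLAIM (what is proved, stated in full; the proofs are below) =====
def Claim_equal_f : Prop := ∀ (i : Int) (j : Int) (F : List (List Int)) (A : List Int), Dom_f i j F A → Pre_f i j F A → Spec_f i j F A (f i j F A)

-- ===== LEMMAS AND PROOFS =====

-- the pure value of the game recurrence on top of the initial table F (fueled)
def valAux : Nat → Int → Int → List (List Int) → List Int → Int
  | 0, _, _, _, _ => 0
  | fuel+1, p, q, F, A =>
    if pvGetF F p q ≠ -1 then pvGetF F p q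
    else if p = q then PySem.List.pyGetD A p 0
    else if q = p + 1 then max (PySem.List.pyGetD A p 0) (PySem.List.pyGetD A (p+1) 0)
    else max (PySem.List.pyGetD A p 0 + min (valAux fuel (p+1) (q-1) F A) (valAux fuel (p+2) q F A))
             (PySem.List.pyGetD A q 0 + min (valAux fuel (p+1) (q-1) F A) (valAux fuel p (q-2) F A))

def pvVal (p q : Int) (F : List (List Int)) (A : List Int) : Int :=
  valAux ((q - p).toNat + 1) p q F A

lemma valAux_irrel (f1 : Nat) : ∀ (f2 : Nat) (p q : Int) (F : List (List Int)) (A : List Int),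
    p ≤ q → (q - p).toNat < f1 → (q - p).toNat < f2 →
    valAux f1 p q F A = valAux f2 p q F A := by
  induction f1 with
  | zero => intro f2 p q F A hpq h1 h2; omega
  | succ n ih =>
    intro f2 p q F A hpq h1 h2
    cases f2 with
    | zero => omega
    | succ m =>
      by_cases hF : pvGetF F p q ≠ -1
      · simp [valAux, hF]
      · by_cases hd : p = q
        · simp [valAux, hd]
        · by_cases h1' : q = p + 1
          · simp [valAux, h1']
          · have e1 : valAux n (p+1) (q-1) F A = valAux m (p+1) (q-1) F A :=
              ih m (p+1) (q-1) F A (by omega) (by omega) (by omega)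
            have e2 : valAux n (p+2) q F A = valAux m (p+2) q F A :=
              ih m (p+2) q F A (by omega) (by omega) (by omega)
            have e3 : valAux n p (q-2) F A = valAux m p (q-2) F A :=
              ih m p (q-2) F A (by omega) (by omega) (by omega)
            simp [valAux, hF, hd, h1', e1, e2, e3]

lemma pvVal_memo {p q : Int} {F : List (List Int)} {A : List Int}
    (h : pvGetF F p q ≠ -1) : pvVal p q F A = pvGetF F p q := by
  simp [pvVal, valAux, h]

lemma pvVal_diag {p : Int} {F : List (List Int)} {A : List Int}
    (h : ¬ pvGetF F p p ≠ -1) : pvVal p p F A = PySem.List.pyGetD A p 0 := by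
  simp [pvVal, valAux, h]

lemma pvVal_pair {p : Int} {F : List (List Int)} {A : List Int}
    (h : ¬ pvGetF F p (p+1) ≠ -1) :
    pvVal p (p+1) F A = max (PySem.List.pyGetD A p 0) (PySem.List.pyGetD A (p+1) 0) := by
  have hne : ¬ (p = p + 1) := by omega
  simp [pvVal, valAux, h, hne]

lemma pvVal_rec {p q : Int} {F : List (List Int)} {A : List Int}
    (h : ¬ pvGetF F p q ≠ -1) (hgap : p + 2 ≤ q) :
    pvVal p q F A =
      max (PySem.List.pyGetD A p 0 + min (pvVal (p+1) (q-1) F A) (pvVal (p+2) q F A))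
          (PySem.List.pyGetD A q 0 + min (pvVal (p+1) (q-1) F A) (pvVal p (q-2) F A)) := by
  have hd : ¬ (p = q) := by omega
  have h1 : ¬ (q = p + 1) := by omega
  have e1 : valAux ((q - p).toNat) (p+1) (q-1) F A = pvVal (p+1) (q-1) F A :=
    valAux_irrel _ _ _ _ _ _ (by omega) (by omega) (by omega)
  have e2 : valAux ((q - p).toNat) (p+2) q F A = pvVal (p+2) q F A :=
    valAux_irrel _ _ _ _ _ _ (by omega) (by omega) (by omega)
  have e3 : valAux ((q - p).toNat) p (q-2) F A = pvVal p (q-2) F A :=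
    valAux_irrel _ _ _ _ _ _ (by omega) (by omega) (by omega)
  simp [pvVal, valAux, h, hd, h1, e1, e2, e3]

-- ---------- table reads/writes ----------

lemma pyGetD_toNat {α : Type} (xs : List α) (i : Int) (d : α) (h : 0 ≤ i) :
    PySem.List.pyGetD xs i d = xs.getD i.toNat d := by
  have hi : i = ((i.toNat : Nat) : Int) := (Int.toNat_of_nonneg h).symm
  rw [hi, PySem.List.pyGetD_natCast, Int.toNat_natCast]

lemma pvGetF_eq (F : List (List Int)) {p q : Int} (hp : 0 ≤ p) (hq : 0 ≤ q) :
    pvGetF F p q = (F.getD p.toNat []).getD q.toNat 0 := by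
  rw [pvGetF, pyGetD_toNat _ _ _ hp, pyGetD_toNat _ _ _ hq]

lemma pvSetF_eq (F : List (List Int)) {p q : Int} (v : Int) (hp : 0 ≤ p) (hq : 0 ≤ q) :
    pvSetF F p q v = F.set p.toNat ((F.getD p.toNat []).set q.toNat v) := by
  rw [pvSetF, PySem.List.pySetD_of_nonneg _ _ hp, PySem.List.pySetD_of_nonneg _ _ hq,
      pyGetD_toNat _ _ _ hp]

lemma getD_set_self {α : Type} {xs : List α} {n : Nat} {v d : α} :
    (xs.set n v).getD n d = if n < xs.length then v else xs.getD n d := by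
  by_cases h : n < xs.length
  · simp [List.getD_eq_getElem?_getD, h]
  · simp [List.getD_eq_getElem?_getD, h]

lemma getD_set_ne {α : Type} {xs : List α} {n m : Nat} {v d : α} (h : m ≠ n) :
    (xs.set n v).getD m d = xs.getD m d := by
  rw [List.getD_eq_getElem?_getD, List.getD_eq_getElem?_getD, List.getElem?_set,
      if_neg (show ¬ n = m by omega)]

lemma pvGetF_pvSetF_ne {F : List (List Int)} {p q p' q' : Int} {v : Int}
    (hp : 0 ≤ p) (hq : 0 ≤ q) (hp' : 0 ≤ p') (hq' : 0 ≤ q')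
    (hne : ¬ (p' = p ∧ q' = q)) :
    pvGetF (pvSetF F p q v) p' q' = pvGetF F p' q' := by
  rw [pvGetF_eq _ hp' hq', pvGetF_eq _ hp' hq', pvSetF_eq _ _ hp hq]
  by_cases hrow : p' = p
  · subst hrow
    have hqq : q'.toNat ≠ q.toNat := by omega
    rw [getD_set_self]
    by_cases hlen : p'.toNat < F.length
    · rw [if_pos hlen, getD_set_ne hqq]
    · rw [if_neg hlen]
  · rw [getD_set_ne (by omega)]

lemma pvGetF_pvSetF_self {F : List (List Int)} {p q : Int} {v : Int}
    (hp : 0 ≤ p) (hq : 0 ≤ q) :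
    pvGetF (pvSetF F p q v) p q = v ∨ pvGetF (pvSetF F p q v) p q = pvGetF F p q := by
  rw [pvGetF_eq _ hp hq, pvGetF_eq _ hp hq, pvSetF_eq _ _ hp hq]
  rw [getD_set_self]
  by_cases hlen : p.toNat < F.length
  · rw [if_pos hlen, getD_set_self]
    by_cases hql : q.toNat < (F.getD p.toNat []).length
    · left; rw [if_pos hql]
    · right; rw [if_neg hql]
  · right; rw [if_neg hlen]

-- ---------- A-side: memo-table invariant ----------

def pvGood (F0 Fc : List (List Int)) (A : List Int) : Prop :=
  ∀ p q : Int, 0 ≤ p → p ≤ q →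
    (pvGetF F0 p q ≠ -1 → pvGetF Fc p q = pvGetF F0 p q) ∧
    (pvGetF F0 p q = -1 → pvGetF Fc p q = -1 ∨ pvGetF Fc p q = pvVal p q F0 A)

lemma pvGood_refl (F : List (List Int)) (A : List Int) : pvGood F F A := by
  intro p q _ _; exact ⟨fun _ => rfl, fun h => Or.inl h⟩

lemma pvGood_set {F0 Fc : List (List Int)} {A : List Int} {p q : Int}
    (hG : pvGood F0 Fc A) (hp : 0 ≤ p) (hq : p ≤ q) (h0 : pvGetF F0 p q = -1) :
    pvGood F0 (pvSetF Fc p q (pvVal p q F0 A)) A := by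
  intro p' q' hp' hq'
  have hq0 : 0 ≤ q := le_trans hp hq
  have hq0' : 0 ≤ q' := le_trans hp' hq'
  by_cases hkey : p' = p ∧ q' = q
  · obtain ⟨rfl, rfl⟩ := hkey
    constructor
    · intro h; exact absurd h0 h
    · intro _
      rcases pvGetF_pvSetF_self (F := Fc) (v := pvVal p' q' F0 A) hp hq0 with h | h
      · exact Or.inr h
      · rw [h]; exact (hG p' q' hp' hq').2 h0
  · rw [pvGetF_pvSetF_ne (F := Fc) (v := pvVal p q F0 A) hp hq0 hp' hq0' hkey]
    exact hG p' q' hp' hq'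

lemma fAux_spec : ∀ (fuel : Nat) (i j : Int) (F0 Fc : List (List Int)) (A : List Int),
    0 ≤ i → i ≤ j → (j - i).toNat < fuel → pvGood F0 Fc A →
    (fAux fuel i j Fc A).1 = pvVal i j F0 A ∧ pvGood F0 (fAux fuel i j Fc A).2 A := by
  intro fuel
  induction fuel with
  | zero => intro i j F0 Fc A hi hij hf _; omega
  | succ n ih =>
    intro i j F0 Fc A hi hij hf hG
    by_cases hF : pvGetF Fc i j ≠ -1
    · refine ⟨?_, by simpa [fAux, hF] using hG⟩
      simp only [fAux, if_pos hF]
      by_cases h0 : pvGetF F0 i j ≠ -1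
      · rw [(hG i j hi hij).1 h0, pvVal_memo h0]
      · rcases (hG i j hi hij).2 (by omega) with h | h
        · exact absurd h hF
        · exact h
    · have h0 : pvGetF F0 i j = -1 := by
        by_contra h0
        exact hF (by rw [(hG i j hi hij).1 h0]; exact h0)
      by_cases hd : i = j
      · subst hd
        have hv : pvVal i i F0 A = PySem.List.pyGetD A i 0 := pvVal_diag (by simp [h0])
        constructor
        · simp only [fAux, if_neg hF]
          exact hv.symm
        · simp only [fAux, if_neg hF]
          have hgood := pvGood_set hG hi (le_refl i) h0
          rwa [hv] at hgood
      · by_cases h1 : j = i + 1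
        · subst h1
          have hv : pvVal i (i+1) F0 A =
              max (PySem.List.pyGetD A i 0) (PySem.List.pyGetD A (i+1) 0) :=
            pvVal_pair (by simp [h0])
          constructor
          · simp only [fAux, if_neg hF, if_neg hd]
            exact hv.symm
          · simp only [fAux, if_neg hF, if_neg hd]
            have hgood := pvGood_set hG hi (by omega) h0
            rwa [hv] at hgood
        · have hgap : i + 2 ≤ j := by omega
          obtain ⟨e1, g1⟩ := ih (i+1) (j-1) F0 Fc A (by omega) (by omega) (by omega) hG
          obtain ⟨e2, g2⟩ := ih (i+2) j F0 (fAux n (i+1) (j-1) Fc A).2 A (by omega) (by omega) (by omega) g1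
          obtain ⟨e3, g3⟩ := ih (i+1) (j-1) F0 (fAux n (i+2) j (fAux n (i+1) (j-1) Fc A).2 A).2 A (by omega) (by omega) (by omega) g2
          obtain ⟨e4, g4⟩ := ih i (j-2) F0 _ A (by omega) (by omega) (by omega) g3
          have hval :
              max (PySem.List.pyGetD A i 0 +
                    min (fAux n (i+1) (j-1) Fc A).1
                        (fAux n (i+2) j (fAux n (i+1) (j-1) Fc A).2 A).1)
                  (PySem.List.pyGetD A j 0 +
                    min (fAux n (i+1) (j-1) (fAux n (i+2) j (fAux n (i+1) (j-1) Fc A).2 A).2 A).1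
                        (fAux n i (j-2) (fAux n (i+1) (j-1) (fAux n (i+2) j (fAux n (i+1) (j-1) Fc A).2 A).2 A).2 A).1)
                = pvVal i j F0 A := by
            rw [e1, e2, e3, e4, pvVal_rec (by simp [h0]) hgap]
          constructor
          · simp only [fAux, if_neg hF, if_neg hd, if_neg h1]
            exact hval
          · simp only [fAux, if_neg hF, if_neg hd, if_neg h1]
            have hgood := pvGood_set g4 hi hij h0
            rwa [← hval] at hgood

-- ---------- B-side: tabulation invariant ----------

def pvFilled (i j : Int) (F : List (List Int)) (A : List Int) (d : Int)
    (G : PySem.Dict (Int × Int) Int) : Prop :=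
  ∀ p q : Int, i ≤ p → p ≤ q → q ≤ j → (q - p) % 2 = (j - i) % 2 → q - p < d →
    G.getD (p, q) 0 = pvVal p q F A

lemma pvFilled_mono {i j : Int} {F : List (List Int)} {A : List Int} {d d' : Int}
    {G : PySem.Dict (Int × Int) Int} (h : pvFilled i j F A d G) (hdd : d' ≤ d) :
    pvFilled i j F A d' G := fun p q h1 h2 h3 h4 h5 => h p q h1 h2 h3 h4 (by omega)

lemma bCell_getD_ne {F : List (List Int)} {A : List Int} {d p : Int}
    {G : PySem.Dict (Int × Int) Int} {k : Int × Int} (h : k ≠ (p, p + d)) :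
    (bCell F A d G p).getD k 0 = G.getD k 0 := by
  rw [bCell]; rw [PySem.Dict.getD_insert, if_neg h]

lemma bCell_val {i j : Int} {F : List (List Int)} {A : List Int} {d p : Int}
    {G : PySem.Dict (Int × Int) Int}
    (hd0 : 0 ≤ d) (hpar : d % 2 = (j - i) % 2) (hp : i ≤ p) (hq : p + d ≤ j)
    (hG : pvFilled i j F A d G) :
    (bCell F A d G p).getD (p, p + d) 0 = pvVal p (p + d) F A := by
  rw [bCell]; rw [PySem.Dict.getD_insert, if_pos rfl]
  by_cases hF : pvGetF F p (p + d) ≠ -1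
  · rw [if_pos hF, pvVal_memo hF]
  · rw [if_neg hF]
    by_cases h0 : d = 0
    · subst h0; rw [if_pos rfl]
      have := pvVal_diag (F := F) (A := A) (p := p) (by simpa using hF)
      simpa using this.symm
    · rw [if_neg h0]
      by_cases h1 : d = 1
      · subst h1; rw [if_pos rfl]
        exact (pvVal_pair (by simpa using hF)).symm
      · rw [if_neg h1]
        have hgap : p + 2 ≤ p + d := by omega
        have l1 : G.getD (p+1, p + d - 1) 0 = pvVal (p+1) (p + d - 1) F A :=
          hG (p+1) (p + d - 1) (by omega) (by omega) (by omega) (by omega) (by omega)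
        have l2 : G.getD (p+2, p + d) 0 = pvVal (p+2) (p + d) F A :=
          hG (p+2) (p + d) (by omega) (by omega) (by omega) (by omega) (by omega)
        have l3 : G.getD (p, p + d - 2) 0 = pvVal p (p + d - 2) F A :=
          hG p (p + d - 2) (by omega) (by omega) (by omega) (by omega) (by omega)
        rw [pvVal_rec (by simpa using hF) hgap, l1, l2, l3]

lemma inner_fold {i j : Int} {F : List (List Int)} {A : List Int} {d : Int}
    (hd0 : 0 ≤ d) (hpar : d % 2 = (j - i) % 2) :
    ∀ (m : Nat) (p0 : Int) (G : PySem.Dict (Int × Int) Int), i ≤ p0 →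
      m = (j - d + 1 - p0).toNat →
      pvFilled i j F A d G →
      (∀ p : Int, i ≤ p → p < p0 → G.getD (p, p + d) 0 = pvVal p (p + d) F A) →
      pvFilled i j F A d ((PySem.List.pyRange p0 (j - d + 1) 1).foldl (bCell F A d) G) ∧
      (∀ p : Int, i ≤ p → p < j - d + 1 →
        ((PySem.List.pyRange p0 (j - d + 1) 1).foldl (bCell F A d) G).getD (p, p + d) 0 = pvVal p (p + d) F A) := by
  intro m
  induction m with
  | zero =>
    intro p0 G hp0 hm hFill hBelow
    rw [PySem.List.pyRange_one_eq_nil (by omega)]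
    exact ⟨hFill, fun p h1 h2 => hBelow p h1 (by omega)⟩
  | succ n ih =>
    intro p0 G hp0 hm hFill hBelow
    rw [PySem.List.pyRange_one_cons (by omega), List.foldl_cons]
    refine ih (p0 + 1) (bCell F A d G p0) (by omega) (by omega) ?_ ?_
    · intro p q h1 h2 h3 h4 h5
      rw [bCell_getD_ne (by intro he; rw [Prod.mk.injEq] at he; omega)]
      exact hFill p q h1 h2 h3 h4 h5
    · intro p h1 h2
      by_cases hpp : p = p0
      · subst hpp
        exact bCell_val hd0 hpar h1 (by omega) hFill
      · rw [bCell_getD_ne (by intro he; rw [Prod.mk.injEq] at he; omega)]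
        exact hBelow p h1 (by omega)

lemma outer_fold {i j : Int} {F : List (List Int)} {A : List Int} :
    ∀ (m : Nat) (d0 : Int) (G : PySem.Dict (Int × Int) Int), 0 ≤ d0 →
      m = (j - i + 1 - d0).toNat →
      pvFilled i j F A d0 G →
      pvFilled i j F A (j - i + 1) ((PySem.List.pyRange d0 (j - i + 1) 1).foldl (bRow i j F A) G) := by
  intro m
  induction m with
  | zero =>
    intro d0 G hd0 hm hFill
    rw [PySem.List.pyRange_one_eq_nil (by omega)]
    exact pvFilled_mono hFill (by omega)
  | succ n ih =>
    intro d0 G hd0 hm hFill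
    rw [PySem.List.pyRange_one_cons (by omega), List.foldl_cons]
    refine ih (d0 + 1) (bRow i j F A G d0) (by omega) (by omega) ?_
    rw [bRow]
    have hmod : PySem.Int.mod d0 2 = d0 % 2 := PySem.Int.mod_eq_emod_of_pos (by norm_num)
    have hmod2 : PySem.Int.mod (j - i) 2 = (j - i) % 2 := PySem.Int.mod_eq_emod_of_pos (by norm_num)
    by_cases hpar : PySem.Int.mod d0 2 ≠ PySem.Int.mod (j - i) 2
    · rw [if_pos hpar]
      rw [hmod, hmod2] at hpar
      intro p q h1 h2 h3 h4 h5
      exact hFill p q h1 h2 h3 h4 (by omega)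
    · rw [if_neg hpar]
      rw [hmod, hmod2] at hpar
      have hpar' : d0 % 2 = (j - i) % 2 := by omega
      obtain ⟨hF', hRow⟩ := inner_fold hd0 hpar' (j - d0 + 1 - i).toNat i G (le_refl i) rfl hFill
        (fun p h1 h2 => absurd h2 (by omega))
      intro p q h1 h2 h3 h4 h5
      by_cases hgap : q - p = d0
      · have : q = p + d0 := by omega
        subst this
        exact hRow p h1 (by omega)
      · exact hF' p q h1 h2 h3 h4 (by omega)

lemma f_alt_eq_pvVal {i j : Int} {F : List (List Int)} {A : List Int}
    (hij : i ≤ j) : f_alt i j F A = pvVal i j F A := by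
  rw [f_alt]
  by_cases hF : pvGetF F i j ≠ -1
  · rw [if_pos hF, pvVal_memo hF]
  · rw [if_neg hF]
    have hFill0 : pvFilled i j F A 0 PySem.Dict.empty :=
      fun p q h1 h2 h3 h4 h5 => absurd h5 (by omega)
    have := outer_fold (j - i + 1).toNat 0 PySem.Dict.empty (le_refl 0) (by omega) hFill0
    exact this i j (le_refl i) hij (le_refl j) rfl (by omega)

-- ===== VERDICT (by name: the statement is the Claim_ definition above) =====
theorem f_spec : Claim_equal_f := by
  intro i j F A _ hpre
  unfold Spec_f
  cases hpre with
  | inl hmemo =>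
    show (fAux ((j - i).toNat + 1) i j F A).1 = f_alt i j F A
    rw [f_alt, if_pos hmemo.2.2]
    simp only [fAux, if_pos hmemo.2.2]
  | inr h =>
    unfold f
    rw [(fAux_spec ((j - i).toNat + 1) i j F F A h.1 h.2.1 (by omega) (pvGood_refl F A)).1,
        f_alt_eq_pvVal h.2.1]
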